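-- pv_equiv track=rewrite | github.com/Ombhavsar218/redscan | rescanai/scan_controller.py | _get_api_testing_messages
-- ===== SOURCE A (Python) =====
-- from typing import Dict, List, Any, Optional, Callable
--
-- def _get_api_testing_messages(step_count: int) -> List[str]:
--     """Generate different API testing messages"""
--     base_messages = [
--         "Starting comprehensive API testing...",
--         "Discovering API endpoints...",
--         "Analyzing API documentation...",
--         "Testing authentication methods...",
--         "Checking authorization controls...",
--         "Analyzing rate limiting...",
--         "Testing input validation...",
--         "Checking data exposure...",
--         "Analyzing CORS policies...",
--         "Testing API versioning...",
--         "Checking error handling...",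
--         "Analyzing request/response formats...",
--         "Testing parameter pollution...",
--         "Checking for injection flaws...",
--         "Analyzing business logic...",
--         "Testing mass assignment...",
--         "Checking for BOLA vulnerabilities...",
--         "Analyzing security headers...",
--         "Testing SSL/TLS implementation...",
--         "Checking for information disclosure...",
--         "Analyzing logging mechanisms...",
--         "Testing for DoS vulnerabilities...",
--         "Checking API key security...",
--         "Analyzing token management...",
--         "Finalizing API security assessment..."
--     ]
--
--     messages = []
--     for i in range(step_count):
--         messages.append(base_messages[i % len(base_messages)])
--     return messages
-- ===== SOURCE B (Python) =====
-- from typing import List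
--
-- def _get_api_testing_messages(step_count: int) -> List[str]:
--     """Generate different API testing messages"""
--     base_messages = [
--         "Starting comprehensive API testing...",
--         "Discovering API endpoints...",
--         "Analyzing API documentation...",
--         "Testing authentication methods...",
--         "Checking authorization controls...",
--         "Analyzing rate limiting...",
--         "Testing input validation...",
--         "Checking data exposure...",
--         "Analyzing CORS policies...",
--         "Testing API versioning...",
--         "Checking error handling...",
--         "Analyzing request/response formats...",
--         "Testing parameter pollution...",
--         "Checking for injection flaws...",
--         "Analyzing business logic...",
--         "Testing mass assignment...",
--         "Checking for BOLA vulnerabilities...",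
--         "Analyzing security headers...",
--         "Testing SSL/TLS implementation...",
--         "Checking for information disclosure...",
--         "Analyzing logging mechanisms...",
--         "Testing for DoS vulnerabilities...",
--         "Checking API key security...",
--         "Analyzing token management...",
--         "Finalizing API security assessment..."
--     ]
--     reps = step_count // len(base_messages) + 1
--     full = base_messages * reps
--     return full[:step_count]
-- ===== Notes on version B (the rewrite author's own statement) =====
-- stated objective: simpler
-- what changed: Replaces the per-step loop appending a modulo-indexed element each iteration with a bulk tile-and-truncate: list-multiply the base messages enough times (floor-division of step_count by the list length, plus an extra repetition) and slice the result to step_count.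
import Mathlib
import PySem

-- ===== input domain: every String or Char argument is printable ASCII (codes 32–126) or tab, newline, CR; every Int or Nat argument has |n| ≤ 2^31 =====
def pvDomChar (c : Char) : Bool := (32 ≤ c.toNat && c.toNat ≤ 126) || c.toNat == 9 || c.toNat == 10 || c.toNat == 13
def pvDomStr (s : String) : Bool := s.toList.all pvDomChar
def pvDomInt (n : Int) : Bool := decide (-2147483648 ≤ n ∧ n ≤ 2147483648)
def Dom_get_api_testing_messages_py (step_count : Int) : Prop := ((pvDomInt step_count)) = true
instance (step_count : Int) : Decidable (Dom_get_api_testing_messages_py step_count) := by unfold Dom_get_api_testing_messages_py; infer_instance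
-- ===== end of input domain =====

-- B replaces A's one-message-at-a-time modulo-indexed append loop by building the whole
-- repetition in bulk (list-multiply, then slice) — objective: simpler decomposition.

-- the fixed message list (shared text constant, used by both ports)
def pvBase : List String := [
    "Starting comprehensive API testing...",
    "Discovering API endpoints...",
    "Analyzing API documentation...",
    "Testing authentication methods...",
    "Checking authorization controls...",
    "Analyzing rate limiting...",
    "Testing input validation...",
    "Checking data exposure...",
    "Analyzing CORS policies...",
    "Testing API versioning...",
    "Checking error handling...",
    "Analyzing request/response formats...",
    "Testing parameter pollution...",
    "Checking for injection flaws...",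
    "Analyzing business logic...",
    "Testing mass assignment...",
    "Checking for BOLA vulnerabilities...",
    "Analyzing security headers...",
    "Testing SSL/TLS implementation...",
    "Checking for information disclosure...",
    "Analyzing logging mechanisms...",
    "Testing for DoS vulnerabilities...",
    "Checking API key security...",
    "Analyzing token management...",
    "Finalizing API security assessment..."]

-- ===== PORT A =====
-- for i in range(step_count): messages.append(base_messages[i % len(base_messages)])
-- index i % 25 always lies in [0,25), so base_messages[...] never raises; pyGetD with
-- default "" is exact here.
def get_api_testing_messages_py (step_count : Int) : List String :=
  (PySem.List.pyRange 0 step_count 1).foldl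
    (fun messages i =>
      messages ++ [PySem.List.pyGetD pvBase (PySem.Int.mod i (pvBase.length : Int)) ""]) []

-- ===== PORT B =====
-- reps = step_count // len(base) + 1; full = base * reps; return full[:step_count]
-- Python 'list * n' is empty for n ≤ 0, which .toNat with List.replicate reproduces exactly.
def get_api_testing_messages_py_alt (step_count : Int) : List String :=
  let reps : Int := PySem.Int.floordiv step_count (pvBase.length : Int) + 1
  let full : List String := (List.replicate reps.toNat pvBase).flatten
  PySem.List.slice full none (some step_count)

-- ===== PRECONDITION & SPEC =====
def Spec_get_api_testing_messages_py (step_count : Int) (out : List String) : Prop := out = get_api_testing_messages_py_alt step_count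
instance (step_count : Int) (out : List String) : Decidable (Spec_get_api_testing_messages_py step_count out) := by unfold Spec_get_api_testing_messages_py; infer_instance

-- ===== CLAIM (what is proved, stated in full; the proofs are below) =====
def Claim_equal_get_api_testing_messages_py : Prop := ∀ (step_count : Int), Dom_get_api_testing_messages_py step_count → Spec_get_api_testing_messages_py step_count (get_api_testing_messages_py step_count)

-- ===== LEMMAS AND PROOFS =====

theorem pvBase_length : pvBase.length = 25 := rfl

-- element j of l repeated k times is l[j % |l|]
theorem getElem?_flatten_replicate {α : Type} (k : Nat) (l : List α) (j : Nat)
    (h : j < k * l.length) :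
    (List.replicate k l).flatten[j]? = l[j % l.length]? := by
  induction k generalizing j with
  | zero => simp at h
  | succ k ih =>
    have hlen : 0 < l.length := by
      rcases Nat.eq_zero_or_pos l.length with h0 | h0
      · rw [h0, Nat.mul_zero] at h; omega
      · exact h0
    rw [Nat.succ_mul] at h
    rw [List.replicate_succ, List.flatten_cons]
    by_cases hj : j < l.length
    · rw [List.getElem?_append_left hj, Nat.mod_eq_of_lt hj]
    · rw [List.getElem?_append_right (by omega), ih _ (by omega)]
      congr 1
      conv_rhs => rw [show j = l.length + (j - l.length) by omega]
      rw [Nat.add_mod_left]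

theorem take_flatten_replicate_eq_map {α : Type} (d : α) (l : List α) (k N : Nat)
    (hN : N ≤ k * l.length) :
    ((List.replicate k l).flatten).take N
      = (List.range N).map (fun j => l.getD (j % l.length) d) := by
  have hflen : (List.replicate k l).flatten.length = k * l.length := by
    simp [List.length_flatten]
  apply List.ext_getElem?
  intro j
  by_cases hj : j < N
  · have hlen : 0 < l.length := by
      rcases Nat.eq_zero_or_pos l.length with h0 | h0
      · rw [h0, Nat.mul_zero] at hN; omega
      · exact h0
    rw [List.getElem?_take_of_lt hj, List.getElem?_map, List.getElem?_range hj,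
        getElem?_flatten_replicate k l j (by omega)]
    simp [List.getD_eq_getElem?_getD,
          List.getElem?_eq_getElem (show j % l.length < l.length from Nat.mod_lt _ hlen)]
  · rw [List.getElem?_eq_none, List.getElem?_eq_none]
    · simp; omega
    · rw [List.length_take]
      exact le_trans (min_le_left _ _) (by omega)

-- ===== VERDICT (by name: the statement is the Claim_ definition above) =====
theorem get_api_testing_messages_py_spec : Claim_equal_get_api_testing_messages_py := by
  intro n _
  show get_api_testing_messages_py n = get_api_testing_messages_py_alt n
  unfold get_api_testing_messages_py get_api_testing_messages_py_alt
  by_cases hn : n ≤ 0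
  · -- both sides empty: the range is empty; in B, reps ≤ 0 for n < 0 and the slice is take 0 for n = 0
    rw [PySem.List.pyRange_one_eq_nil hn]
    rcases lt_or_eq_of_le hn with h | h
    · have hfl : PySem.Int.floordiv n (pvBase.length : Int) < 0 := by
        rw [PySem.Int.floordiv_lt_iff_lt_mul
          (show (0:Int) < (pvBase.length : Int) by rw [pvBase_length]; norm_num)]
        omega
      have hreps : (PySem.Int.floordiv n (pvBase.length : Int) + 1).toNat = 0 := by omega
      simp only [List.foldl_nil, hreps, List.replicate_zero, List.flatten_nil]
      simp [PySem.List.slice]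
    · subst h
      simp only [List.foldl_nil]
      rw [PySem.List.slice_to _ (le_refl 0)]
      simp
  · push Not at hn
    obtain ⟨N, rfl⟩ : ∃ N : Nat, n = (N : Int) := ⟨n.toNat, by omega⟩
    -- A side: fold → map over range;  B side: slice → take
    rw [PySem.List.foldl_append_singleton_eq_map, List.nil_append,
        PySem.List.pyRange_zero_natCast, PySem.List.slice_to_natCast]
    have hfd : (PySem.Int.floordiv (N : Int) (pvBase.length : Int) + 1).toNat = N / 25 + 1 := by
      rw [pvBase_length, PySem.Int.floordiv_natCast]
      omega
    rw [hfd,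
        take_flatten_replicate_eq_map "" pvBase (N / 25 + 1) N
          (by rw [pvBase_length]; omega)]
    rw [List.map_map]
    apply List.map_congr_left
    intro k hk
    simp only [Function.comp, pvBase_length]
    rw [show ((25 : Nat) : Int) = ((25 : Nat) : Int) from rfl,
        PySem.Int.mod_natCast k 25, PySem.List.pyGetD_natCast]
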